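-- pv_equiv track=rewrite | github.com/plato001/geekbrains-bigdata-python-basic | task_06.py | make_analytics
-- ===== SOURCE A (Python) =====
-- def make_analytics(goods):
--     # результат
--     res = dict()
--
--     for n, item in goods:
--         for k, v in item.items():
--             # читаем текущее значение для res
--             buf = res.get(k)
--
--             if buf is None:
--                 res[k] = [v]
--             else:
--                 # добавляем к нему новое значение
--                 if v not in buf:
--                     buf.append(v)
--                 # обновляем значение в res
--                 res[k] = buf
--
--     return res
-- ===== SOURCE B (Python) =====
-- def make_analytics(goods):
--     # flatten all (key, value) occurrences once, then for each first-seen key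
--     # collect its distinct values by filtering the flat list
--     pairs = [(k, v) for _, item in goods for k, v in item.items()]
--     keys = list(dict.fromkeys(k for k, _ in pairs))
--     return {k: list(dict.fromkeys(v for kk, v in pairs if kk == k)) for k in keys}
-- ===== Notes on version B (the rewrite author's own statement) =====
-- stated objective: alternative
-- what changed: B keeps no running dict at all: it flattens goods into one list of (key, value) pairs, computes the first-seen key order with dict.fromkeys, and builds each key's value list by filtering the flat pair list and deduplicating it, instead of A's incremental dict with an inline 'v not in buf' membership scan per insertion.
import Mathlib
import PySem

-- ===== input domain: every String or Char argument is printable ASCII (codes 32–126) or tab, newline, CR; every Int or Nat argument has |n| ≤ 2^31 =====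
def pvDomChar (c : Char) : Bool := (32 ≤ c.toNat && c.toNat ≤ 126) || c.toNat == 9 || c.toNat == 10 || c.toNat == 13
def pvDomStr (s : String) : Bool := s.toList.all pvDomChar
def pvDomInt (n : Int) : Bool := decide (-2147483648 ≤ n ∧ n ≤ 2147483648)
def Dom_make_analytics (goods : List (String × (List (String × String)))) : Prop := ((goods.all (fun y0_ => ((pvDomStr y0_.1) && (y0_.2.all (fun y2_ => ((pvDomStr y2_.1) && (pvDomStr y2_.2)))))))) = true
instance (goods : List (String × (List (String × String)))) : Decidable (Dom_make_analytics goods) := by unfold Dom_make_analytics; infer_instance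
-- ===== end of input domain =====

-- B keeps no running dict: it flattens goods into one pair list, takes the first-seen key order
-- with dict.fromkeys, and builds each key's distinct values by filtering the flat list; objective: alternative.

-- ===== PORT A =====
-- one (k, v) step of A's inner loop: buf = res.get(k); if None: res[k] = [v]
-- else: if v not in buf: buf.append(v); res[k] = buf
def stepA (res : PySem.Dict String (List String)) (kv : String × String) :
    PySem.Dict String (List String) :=
  match res.get? kv.1 with
  | none => res.insert kv.1 [kv.2]
  | some buf => res.insert kv.1 (if buf.contains kv.2 then buf else buf ++ [kv.2])

def make_analytics (goods : List (String × (List (String × String)))) : List (String × List String) :=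
  (goods.foldl (fun res p => p.2.foldl stepA res) PySem.Dict.empty).items

-- ===== PORT B =====
-- pairs = [(k, v) for _, item in goods for k, v in item.items()]
-- keys = list(dict.fromkeys(k for k, _ in pairs))
-- {k: list(dict.fromkeys(v for kk, v in pairs if kk == k)) for k in keys}
def make_analytics_alt (goods : List (String × (List (String × String)))) : List (String × List String) :=
  let pairs := goods.flatMap (fun p => p.2)
  let keys := PySem.List.dedup (pairs.map Prod.fst)
  (PySem.Dict.ofList (keys.map (fun k =>
    (k, PySem.List.dedup ((pairs.filter (fun q => q.1 == k)).map Prod.snd)))) :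
    PySem.Dict String (List String)).items

-- ===== PRECONDITION & SPEC =====
def Spec_make_analytics (goods : List (String × (List (String × String)))) (out : List (String × List String)) : Prop := out = make_analytics_alt goods
instance (goods : List (String × (List (String × String)))) (out : List (String × List String)) : Decidable (Spec_make_analytics goods out) := by unfold Spec_make_analytics; infer_instance

-- ===== CLAIM (what is proved, stated in full; the proofs are below) =====
def Claim_equal_make_analytics : Prop := ∀ (goods : List (String × (List (String × String)))), Dom_make_analytics goods → Spec_make_analytics goods (make_analytics goods)

-- ===== LEMMAS AND PROOFS =====

-- A's nested loop over goods is the single loop over the flattened pair list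
theorem foldlA_flatten (goods : List (String × (List (String × String))))
    (d : PySem.Dict String (List String)) :
    goods.foldl (fun res p => p.2.foldl stepA res) d =
      (goods.flatMap (fun p => p.2)).foldl stepA d := by
  induction goods generalizing d with
  | nil => rfl
  | cons g t ih => simp [List.flatMap_cons, List.foldl_append, ih]

theorem dedup_append_singleton {α : Type} [DecidableEq α] (xs : List α) (v : α) :
    PySem.List.dedup (xs ++ [v]) =
      if (PySem.List.dedup xs).contains v then PySem.List.dedup xs
      else PySem.List.dedup xs ++ [v] := by
  show (xs ++ [v]).foldl PySem.Set.add [] = _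
  rw [List.foldl_append]
  rfl

-- the invariant characterising A's running dict after consuming a prefix of the pair list
def InvA (pairs : List (String × String)) (d : PySem.Dict String (List String)) : Prop :=
  d.keys = PySem.List.dedup (pairs.map Prod.fst) ∧
  ∀ k, d.get? k =
    if (pairs.map Prod.fst).contains k then
      some (PySem.List.dedup ((pairs.filter (fun q => q.1 == k)).map Prod.snd))
    else none

theorem invA_step (pairs : List (String × String)) (d : PySem.Dict String (List String))
    (kv : String × String) (h : InvA pairs d) : InvA (pairs ++ [kv]) (stepA d kv) := by
  obtain ⟨hk, hg⟩ := h
  have hkeysmem : ∀ j, ((pairs.map Prod.fst).contains j) = d.contains j := by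
    intro j
    rw [PySem.Dict.contains_eq_decide_mem_keys, hk]
    simp
  have hmapapp : (pairs ++ [kv]).map Prod.fst = pairs.map Prod.fst ++ [kv.1] := by simp
  have hdedupmem : (PySem.List.dedup (pairs.map Prod.fst)).contains kv.1 =
      (pairs.map Prod.fst).contains kv.1 := by
    simp
  cases hcget : d.get? kv.1 with
  | none =>
    have hc : d.contains kv.1 = false := (PySem.Dict.get?_eq_none_iff_contains d kv.1).mp hcget
    have hlc : (pairs.map Prod.fst).contains kv.1 = false := by rw [hkeysmem, hc]
    have hstep : stepA d kv = d.insert kv.1 [kv.2] := by unfold stepA; rw [hcget]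
    have hnm : kv.1 ∉ pairs.map Prod.fst := by simpa using hlc
    have hnil : pairs.filter (fun q => q.1 == kv.1) = [] := by
      rw [List.filter_eq_nil_iff]
      intro q hq hbeq
      exact hnm ((beq_iff_eq.mp hbeq) ▸ List.mem_map_of_mem hq)
    constructor
    · rw [hstep, PySem.Dict.keys_insert_of_not_contains d _ hc, hmapapp,
          dedup_append_singleton, hdedupmem, hlc, hk]
      simp
    · intro j
      rw [hstep, PySem.Dict.get?_insert, hmapapp]
      by_cases hj : j = kv.1
      · subst hj
        rw [if_pos rfl, List.filter_append, hnil]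
        simp
        rfl
      · rw [if_neg hj, hg j, List.filter_append]
        have h1 : (pairs.map Prod.fst ++ [kv.1]).contains j = (pairs.map Prod.fst).contains j := by
          simp [hj]
        have h2 : [kv].filter (fun q => q.1 == j) = [] := by
          have hne : (kv.1 == j) = false := by simp [Ne.symm hj]
          simp [List.filter, hne]
        rw [h1, h2, List.append_nil]
  | some buf =>
    have hlc : (pairs.map Prod.fst).contains kv.1 = true := by
      rw [hkeysmem]
      rw [PySem.Dict.contains_eq_isSome_get?, hcget]
      rfl
    have hbuf : buf = PySem.List.dedup ((pairs.filter (fun q => q.1 == kv.1)).map Prod.snd) := by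
      have := hg kv.1
      rw [hcget, hlc, if_pos rfl] at this
      exact (Option.some.injEq _ _).mp this
    have hc : d.contains kv.1 = true := by rw [← hkeysmem, hlc]
    have hstep : stepA d kv =
        d.insert kv.1 (if buf.contains kv.2 then buf else buf ++ [kv.2]) := by
      unfold stepA; rw [hcget]
    constructor
    · rw [hstep, PySem.Dict.keys_insert_of_contains d _ hc, hmapapp,
          dedup_append_singleton, hdedupmem, hlc, hk]
      simp
    · intro j
      rw [hstep, PySem.Dict.get?_insert, hmapapp]
      by_cases hj : j = kv.1
      · subst hj
        rw [if_pos rfl, List.filter_append]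
        have hfkv : [kv].filter (fun q => q.1 == kv.1) = [kv] := by simp
        have hcont : (pairs.map Prod.fst ++ [kv.1]).contains kv.1 = true := by simp
        rw [hfkv, hcont, if_pos rfl,
            show ((pairs.filter (fun q => q.1 == kv.1)) ++ [kv]).map Prod.snd =
              (pairs.filter (fun q => q.1 == kv.1)).map Prod.snd ++ [kv.2] by simp,
            dedup_append_singleton, ← hbuf]
      · rw [if_neg hj, hg j, List.filter_append]
        have h1 : (pairs.map Prod.fst ++ [kv.1]).contains j = (pairs.map Prod.fst).contains j := by
          simp [hj]
        have h2 : [kv].filter (fun q => q.1 == j) = [] := by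
          have hne : (kv.1 == j) = false := by simp [Ne.symm hj]
          simp [List.filter, hne]
        rw [h1, h2, List.append_nil]

theorem invA_foldl (pairs : List (String × String)) :
    InvA pairs (pairs.foldl stepA PySem.Dict.empty) := by
  induction pairs using List.reverseRecOn with
  | nil => exact ⟨rfl, fun k => rfl⟩
  | append_singleton t kv ih =>
      rw [List.foldl_append]
      exact invA_step t _ kv ih

-- ofList on a list with pairwise-distinct keys returns exactly that list as items
theorem items_ofList_nodup (l : List (String × List String)) (h : (l.map Prod.fst).Nodup) :
    (PySem.Dict.ofList l).items = l := by
  have : PySem.Dict.ofList l = l.foldl (fun d p => d.insert p.1 p.2) PySem.Dict.empty := rfl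
  rw [this, PySem.Dict.items_foldl_insert_fresh l Prod.fst Prod.snd PySem.Dict.empty
      (fun a _ => PySem.Dict.contains_empty a.1) h]
  show [] ++ l.map (fun a => (a.1, a.2)) = l
  simp

-- ===== VERDICT (by name: the statement is the Claim_ definition above) =====
theorem make_analytics_spec : Claim_equal_make_analytics := by
  intro goods _
  show make_analytics goods = make_analytics_alt goods
  unfold make_analytics make_analytics_alt
  rw [foldlA_flatten]
  set pairs := goods.flatMap (fun p => p.2) with hp
  obtain ⟨hk, hg⟩ := invA_foldl pairs
  set d := pairs.foldl stepA PySem.Dict.empty with hd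
  have hnd : d.keys.Nodup := by rw [hk]; exact PySem.List.nodup_dedup _
  have hfstnd : ((PySem.List.dedup (pairs.map Prod.fst)).map
      (fun k => (k, PySem.List.dedup ((pairs.filter (fun q => q.1 == k)).map Prod.snd))) |>.map Prod.fst).Nodup := by
    rw [List.map_map,
        show (Prod.fst ∘ fun k => (k, PySem.List.dedup ((pairs.filter (fun q => q.1 == k)).map Prod.snd))) = fun k => k from rfl,
        List.map_id']
    exact PySem.List.nodup_dedup _
  rw [items_ofList_nodup _ hfstnd]
  rw [PySem.Dict.items_eq_map_keys d hnd [], hk]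
  apply List.map_congr_left
  intro k hkmem
  have hcont : (pairs.map Prod.fst).contains k = true := by
    simp only [List.contains_eq_any_beq, List.any_eq_true]
    exact ⟨k, (PySem.List.mem_dedup _ _).mp hkmem, by simp⟩
  have := hg k
  rw [hcont, if_pos rfl] at this
  rw [PySem.Dict.getD_eq_get?_getD, this]
  rfl
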